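-- pv_equiv track=rewrite | github.com/Mumbua-dev/calculator-py | file handling.py | modify_content
-- ===== SOURCE A (Python) =====
-- def modify_content(text: str) -> str:
--
--     lines = text.splitlines()
--     cleaned = []
--     prev_blank = False
--     for line in lines:
--         trimmed = line.rstrip()
--         is_blank = (trimmed == "")
--         if is_blank and prev_blank:
--
--             continue
--         cleaned.append(trimmed)
--         prev_blank = is_blank
--
--     numbered = [f"{i+1:>4} | {line}" for i, line in enumerate(cleaned)]
--     return "\n".join(numbered) + ("\n" if text.endswith("\n") else "")
-- ===== SOURCE B (Python) =====
-- def modify_content(text: str) -> str: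
--     trimmed = [line.rstrip() for line in text.splitlines()]
--     collapsed = []
--     i, n = 0, len(trimmed)
--     while i < n:
--         blank = trimmed[i] == ""
--         j = i
--         while j < n and (trimmed[j] == "") == blank:
--             j += 1
--         if blank:
--             collapsed.append("")
--         else:
--             collapsed.extend(trimmed[i:j])
--         i = j
--     out = "\n".join(f"{k+1:>4} | {line}" for k, line in enumerate(collapsed))
--     return out + ("\n" if text.endswith("\n") else "")
-- ===== Notes on version B (the rewrite author's own statement) =====
-- stated objective: alternative
-- what changed: B pre-trims all lines once and collapses by scanning runs of equal blankness with two indices (emitting one empty string per blank run, extending whole non-blank runs), instead of A's element-by-element loop with a prev_blank flag.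
import Mathlib
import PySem

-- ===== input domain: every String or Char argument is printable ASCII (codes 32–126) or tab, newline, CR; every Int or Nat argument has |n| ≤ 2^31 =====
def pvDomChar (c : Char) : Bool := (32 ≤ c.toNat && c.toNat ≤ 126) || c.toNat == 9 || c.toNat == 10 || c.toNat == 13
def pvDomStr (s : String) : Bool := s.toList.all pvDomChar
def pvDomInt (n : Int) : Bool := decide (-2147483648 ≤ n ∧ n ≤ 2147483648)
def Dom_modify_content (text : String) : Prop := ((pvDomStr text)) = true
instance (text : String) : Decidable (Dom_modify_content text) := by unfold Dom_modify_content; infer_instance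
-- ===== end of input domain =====

-- B collapses blank lines by scanning runs of equal blankness instead of A's prev_blank flag; same output, 'alternative' objective.

-- shared helper: the f-string f"{i+1:>4} | {line}" (identical in both Pythons)
def fmtLine (i : Int) (line : String) : String :=
  let s := PySem.Int.toStr (i + 1)
  let pad := String.ofList (List.replicate (4 - s.toList.length) ' ')
  pad ++ s ++ " | " ++ line

-- ===== PORT A =====
def modify_content (text : String) : String :=
  let lines := PySem.Str.splitlines text
  let st := lines.foldl (fun (st : List String × Bool) line =>
      let trimmed := PySem.Str.rstrip line
      let is_blank := trimmed == ""
      if is_blank && st.2 then st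
      else (st.1 ++ [trimmed], is_blank)) ([], false)
  let numbered := (PySem.List.enumerate st.1).map (fun p => fmtLine p.1 p.2)
  PySem.Str.join "\n" numbered ++ (if PySem.Str.endswith text "\n" then "\n" else "")

-- ===== PORT B =====
-- B's while loop over runs: take the run of lines with the head's blankness, emit, continue after it
def collapseRuns : List String → List String
  | [] => []
  | t :: rest =>
    let blank := t == ""
    (if blank then [""] else t :: rest.takeWhile (fun u => ((u == "") == blank)))
      ++ collapseRuns (rest.dropWhile (fun u => ((u == "") == blank)))
termination_by l => l.length
decreasing_by
  have := List.length_dropWhile_le (fun u => ((u == "") == (t == ""))) rest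
  simp at *; omega

def modify_content_alt (text : String) : String :=
  let trimmed := (PySem.Str.splitlines text).map PySem.Str.rstrip
  let collapsed := collapseRuns trimmed
  let out := PySem.Str.join "\n" ((PySem.List.enumerate collapsed).map (fun p => fmtLine p.1 p.2))
  out ++ (if PySem.Str.endswith text "\n" then "\n" else "")

-- ===== PRECONDITION & SPEC =====
def Spec_modify_content (text : String) (out : String) : Prop := out = modify_content_alt text
instance (text : String) (out : String) : Decidable (Spec_modify_content text out) := by unfold Spec_modify_content; infer_instance

-- ===== CLAIM (what is proved, stated in full; the proofs are below) =====
def Claim_equal_modify_content : Prop := ∀ (text : String), Dom_modify_content text → Spec_modify_content text (modify_content text)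

-- ===== LEMMAS AND PROOFS =====

-- recursive characterisation of A's fold, on already-trimmed lines
def collA : Bool → List String → List String
  | _, [] => []
  | prev, t :: ts => if (t == "") && prev then collA prev ts else t :: collA (t == "") ts

theorem foldA (ls : List String) : ∀ (acc : List String) (prev : Bool),
    (ls.foldl (fun (st : List String × Bool) line =>
      let trimmed := PySem.Str.rstrip line
      let is_blank := trimmed == ""
      if is_blank && st.2 then st
      else (st.1 ++ [trimmed], is_blank)) (acc, prev)).1
    = acc ++ collA prev (ls.map PySem.Str.rstrip) := by
  induction ls with
  | nil => intro acc prev; simp [collA]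
  | cons l ls ih =>
    intro acc prev
    simp only [List.foldl_cons, List.map_cons, collA]
    by_cases h : (PySem.Str.rstrip l == "" && prev) = true
    · rw [if_pos h, if_pos h, ih]
    · rw [if_neg h, if_neg h, ih]
      simp

theorem collA_true (ts : List String) :
    collA true ts = collA false (ts.dropWhile (fun u => ((u == "") == true))) := by
  induction ts with
  | nil => simp [collA]
  | cons t ts ih =>
    by_cases hb : (t == "") = true
    · simp [collA, hb, ih]
    · have hb' : (t == "") = false := by simp_all
      simp [collA, hb']

theorem collA_false_run (ts : List String) :
    collA false ts = ts.takeWhile (fun u => ((u == "") == false))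
      ++ collA false (ts.dropWhile (fun u => ((u == "") == false))) := by
  induction ts with
  | nil => simp [collA]
  | cons t ts ih =>
    by_cases hb : (t == "") = true
    · simp [collA, hb]
    · have hb' : (t == "") = false := by simp_all
      simp [collA, hb', ih]

theorem collA_eq_collapseRuns (ts : List String) : collA false ts = collapseRuns ts := by
  generalize hn : ts.length = n
  induction n using Nat.strong_induction_on generalizing ts with
  | _ n ih =>
    match ts, hn with
    | [], _ => simp [collA, collapseRuns]
    | t :: rest, hn =>
      simp only [collapseRuns]
      by_cases hb : (t == "") = true
      · have ht : t = "" := by simpa using hb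
        have hlen := List.length_dropWhile_le (fun u => ((u == "") == true)) rest
        rw [collA, if_neg (by simp [hb]), hb, collA_true, if_pos rfl]
        rw [ih (rest.dropWhile (fun u => ((u == "") == true))).length
              (by rw [← hn]; simp only [List.length_cons]; omega) _ rfl]
        simp [ht]
      · have hb' : (t == "") = false := by simp_all
        have hlen := List.length_dropWhile_le (fun u => ((u == "") == false)) rest
        rw [collA, if_neg (by simp [hb']), hb', collA_false_run, if_neg (by simp)]
        rw [ih (rest.dropWhile (fun u => ((u == "") == false))).length
              (by rw [← hn]; simp only [List.length_cons]; omega) _ rfl]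
        simp

-- ===== VERDICT (by name: the statement is the Claim_ definition above) =====
theorem modify_content_spec : Claim_equal_modify_content := by
  intro text _
  unfold Spec_modify_content
  simp only [modify_content, modify_content_alt, foldA _ [] false, List.nil_append,
    collA_eq_collapseRuns]
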